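-- pv_equiv track=rewrite | github.com/ViniGarcia/NFV-FLERAS | YAMLR/YAMLREmbedding.py | __yeBranch
-- ===== SOURCE A (Python) =====
-- def __yeBranch(elementsList, start):
--
-- 	skipBrace = 0
-- 	segments = 0
-- 	for index in range(start+1, len(elementsList)):
--
-- 		if elementsList[index] == "}":
-- 			if skipBrace == 0:
-- 				return segments + 1
-- 			else:
-- 				skipBrace -= 1
-- 			continue
--
-- 		if elementsList[index] == "{":
-- 			skipBrace += 1
-- 			continue
--
-- 		if elementsList[index] == "/":
-- 			if skipBrace == 0:
-- 				segments += 1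
-- ===== SOURCE B (Python) =====
-- def __yeBranch(elementsList, start):
-- 	saved = []
-- 	segments = 0
-- 	for t in elementsList[start + 1:]:
-- 		if t == "}":
-- 			if not saved:
-- 				return segments + 1
-- 			segments = saved.pop()
-- 		elif t == "{":
-- 			saved.append(segments)
-- 		elif t == "/":
-- 			segments += 1
-- 	return None
-- ===== Notes on version B (the rewrite author's own statement) =====
-- stated objective: alternative
-- what changed: Replaces A's guarded skipBrace depth counter (count '/' only at depth 0) by a single pass that counts '/' unconditionally and keeps a stack of saved segment counts: save on '{', restore on the matching '}', answer at a '}' seen with an empty stack.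
-- outside the precondition, e.g. on __yeBranch(['}', 'x'], -2): A returns 1, B returns None
-- crash fix: For start+1 < -len(elementsList) A raises IndexError (the first loop index is out of range even after Python's negative wraparound) while B returns None, since its clamped slice is empty. — e.g. on __yeBranch([], -2): A raises IndexError, B returns none
import Mathlib
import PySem

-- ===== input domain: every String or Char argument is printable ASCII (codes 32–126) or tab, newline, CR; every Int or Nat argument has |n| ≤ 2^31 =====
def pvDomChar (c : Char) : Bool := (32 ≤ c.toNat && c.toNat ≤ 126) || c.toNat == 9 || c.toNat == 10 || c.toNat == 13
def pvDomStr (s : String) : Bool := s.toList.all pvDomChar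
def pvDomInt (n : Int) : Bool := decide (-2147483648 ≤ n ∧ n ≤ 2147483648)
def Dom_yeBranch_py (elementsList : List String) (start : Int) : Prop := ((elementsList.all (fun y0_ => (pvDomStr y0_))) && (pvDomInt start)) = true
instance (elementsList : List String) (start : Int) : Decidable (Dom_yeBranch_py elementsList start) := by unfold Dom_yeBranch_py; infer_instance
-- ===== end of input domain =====

-- B replaces A's guarded skipBrace depth counter by a stack of saved segment counts
-- (count '/' unconditionally, save on '{', restore on '}'); same cost, different state.

-- ===== PORT A =====
-- the for-loop over range(start+1, len(elementsList)) with early return, carrying (skipBrace, segments)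
def yeAux (l : List String) : List Int → Int → Int → Option Int
  | [], _, _ => none
  | i :: rest, skip, seg =>
    match PySem.List.pyGet? l i with
    | none => none   -- IndexError (excluded by Pre_)
    | some t =>
      if t = "}" then
        if skip = 0 then some (seg + 1) else yeAux l rest (skip - 1) seg
      else if t = "{" then yeAux l rest (skip + 1) seg
      else if t = "/" then
        if skip = 0 then yeAux l rest skip (seg + 1) else yeAux l rest skip seg
      else yeAux l rest skip seg

def yeBranch_py (elementsList : List String) (start : Int) : Option Int :=
  yeAux elementsList (PySem.List.pyRange (start + 1) (elementsList.length : Int) 1) 0 0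

-- ===== PORT B =====
-- the for-loop over elementsList[start+1:], carrying (saved-counts stack, segments);
-- Python's saved.append / saved.pop work at the END of the list, hence concat/getLast?/dropLast
def yeScanStk : List String → List Int → Int → Option Int
  | [], _, _ => none
  | t :: rest, saved, seg =>
    if t = "}" then
      match saved.getLast? with
      | none => some (seg + 1)             -- 'if not saved: return segments + 1'
      | some s => yeScanStk rest saved.dropLast s   -- 'segments = saved.pop()'
    else if t = "{" then yeScanStk rest (saved ++ [seg]) seg
    else if t = "/" then yeScanStk rest saved (seg + 1)
    else yeScanStk rest saved seg

def yeBranch_py_alt (elementsList : List String) (start : Int) : Option Int :=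
  yeScanStk (PySem.List.slice elementsList (some (start + 1)) none) [] 0

-- ===== PRECONDITION & SPEC =====
-- Pre_ restricts to the natural domain start ≥ -1 (start is the index of an opening brace, -1 meaning
-- 'scan from the beginning'): for start < -1 A either raises IndexError (start+1 < -len) or, via
-- Python's negative-index wraparound, accidentally rescans a suffix followed by the whole list again.
def Pre_yeBranch_py (elementsList : List String) (start : Int) : Prop := -1 ≤ start
instance (elementsList : List String) (start : Int) : Decidable (Pre_yeBranch_py elementsList start) := by unfold Pre_yeBranch_py; infer_instance

def pvWitness_yeBranch_py : List String × Int := (["/", "}"], -1)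

-- For start+1 < -len(elementsList) A raises IndexError while B returns None (empty clamped slice).
def Raises_yeBranch_py (elementsList : List String) (start : Int) : Prop :=
  start + 1 < -(elementsList.length : Int)
instance (elementsList : List String) (start : Int) : Decidable (Raises_yeBranch_py elementsList start) := by unfold Raises_yeBranch_py; infer_instance
def pvRaiseWitness_yeBranch_py : List String × Int := ([], -2)
def pvRaiseWitnessOut_yeBranch_py : Option Int := none

def Spec_yeBranch_py (elementsList : List String) (start : Int) (out : Option Int) : Prop := out = yeBranch_py_alt elementsList start
instance (elementsList : List String) (start : Int) (out : Option Int) : Decidable (Spec_yeBranch_py elementsList start out) := by unfold Spec_yeBranch_py; infer_instance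

-- ===== CLAIM (what is proved, stated in full; the proofs are below) =====
def Claim_equal_yeBranch_py : Prop := ∀ (elementsList : List String) (start : Int), Dom_yeBranch_py elementsList start → Pre_yeBranch_py elementsList start → Spec_yeBranch_py elementsList start (yeBranch_py elementsList start)

def Claim_raises_yeBranch_py : Prop := (∀ (elementsList : List String) (start : Int), Dom_yeBranch_py elementsList start → Raises_yeBranch_py elementsList start → ¬ Pre_yeBranch_py elementsList start) ∧ (Dom_yeBranch_py (pvRaiseWitness_yeBranch_py.1) (pvRaiseWitness_yeBranch_py.2) ∧ Raises_yeBranch_py (pvRaiseWitness_yeBranch_py.1) (pvRaiseWitness_yeBranch_py.2) ∧ yeBranch_py_alt (pvRaiseWitness_yeBranch_py.1) (pvRaiseWitness_yeBranch_py.2) = pvRaiseWitnessOut_yeBranch_py)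

-- ===== LEMMAS AND PROOFS =====

-- A's loop body re-expressed as structural recursion over the token list it visits
def scanA : List String → Int → Int → Option Int
  | [], _, _ => none
  | t :: rest, skip, seg =>
    if t = "}" then
      if skip = 0 then some (seg + 1) else scanA rest (skip - 1) seg
    else if t = "{" then scanA rest (skip + 1) seg
    else if t = "/" then
      if skip = 0 then scanA rest skip (seg + 1) else scanA rest skip seg
    else scanA rest skip seg

theorem bridgeA (l : List String) : ∀ (k s : Nat), l.length - s ≤ k → ∀ (skip seg : Int),
    yeAux l (PySem.List.pyRange (s : Int) (l.length : Int) 1) skip seg = scanA (l.drop s) skip seg := by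
  intro k
  induction k with
  | zero =>
    intro s hs skip seg
    have h1 : l.length ≤ s := by omega
    have h2 : (((l.length : Int)) - (s : Int)).toNat = 0 := by omega
    rw [PySem.List.pyRange_one, h2, List.drop_eq_nil_of_le h1]
    simp [yeAux, scanA]
  | succ k ih =>
    intro s hs skip seg
    by_cases h : s < l.length
    · rw [PySem.List.pyRange_one_cons (by exact_mod_cast h)]
      have hg : PySem.List.pyGet? l ((s : Nat) : Int) = some l[s] := by
        rw [PySem.List.pyGet?_natCast]; simp [List.getElem?_eq_getElem h]
      have e1 : ((s : Nat) : Int) + 1 = (((s + 1 : Nat)) : Int) := by push_cast; ring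
      rw [List.drop_eq_getElem_cons h]
      simp only [yeAux, hg, e1, scanA]
      have IH := fun skip seg => ih (s + 1) (by omega) skip seg
      split_ifs <;> first | rfl | exact IH _ _
    · have h1 : l.length ≤ s := by omega
      have h2 : (((l.length : Int)) - (s : Int)).toNat = 0 := by omega
      rw [PySem.List.pyRange_one, h2, List.drop_eq_nil_of_le h1]
      simp [yeAux, scanA]

-- the loop invariant connecting B's stack of saved counts to A's depth counter:
-- the depth is the stack height, and A's top-level count sits at the BOTTOM of B's stack
theorem stack_sim : ∀ (toks : List String) (saved : List Int) (seg : Int),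
    yeScanStk toks saved seg = scanA toks (saved.length : Int) (saved.headD seg) := by
  intro toks
  induction toks with
  | nil => intro saved seg; simp [yeScanStk, scanA]
  | cons t rest ih =>
    intro saved seg
    by_cases h1 : t = "}"
    · subst h1
      cases hsv : saved.getLast? with
      | none =>
        have hnil : saved = [] := by
          cases saved with
          | nil => rfl
          | cons a l2 => simp at hsv
        subst hnil
        simp [yeScanStk, scanA]
      | some s =>
        have hne : saved ≠ [] := by
          intro hc; subst hc; simp at hsv
        have hlen : 1 ≤ saved.length := by
          cases saved with
          | nil => exact absurd rfl hne
          | cons a l2 => simp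
        have lhs_eq : yeScanStk ("}" :: rest) saved seg = yeScanStk rest saved.dropLast s := by
          simp [yeScanStk, hsv]
        have rhs_eq : scanA ("}" :: rest) (saved.length : Int) (saved.headD seg) =
            scanA rest ((saved.length : Int) - 1) (saved.headD seg) := by
          simp [scanA, hne]
        rw [lhs_eq, rhs_eq, ih]
        have hlen2 : ((saved.dropLast.length : Nat) : Int) = (saved.length : Int) - 1 := by
          rw [List.length_dropLast]; omega
        rw [hlen2]
        congr 1
        -- heads: if the stack had ≥ 2 entries the bottom is unchanged; with exactly 1 the popped
        -- entry s IS the bottom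
        cases saved with
        | nil => exact absurd rfl hne
        | cons a l2 =>
          cases hl2 : l2.eq_nil_or_concat' with
          | inl h0 =>
            subst h0
            simp at hsv
            simp [hsv]
          | inr h0 =>
            obtain ⟨l3, x, hx⟩ := h0
            subst hx
            have hd : (a :: (l3 ++ [x])).dropLast = a :: l3 := by
              rw [show a :: (l3 ++ [x]) = (a :: l3) ++ [x] from rfl, List.dropLast_concat]
            simp [hd]
    · by_cases h2 : t = "{"
      · subst h2
        have lhs_eq : yeScanStk ("{" :: rest) saved seg = yeScanStk rest (saved ++ [seg]) seg := by
          simp [yeScanStk]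
        rw [lhs_eq, ih]
        have : ((saved ++ [seg]).length : Int) = (saved.length : Int) + 1 := by simp
        rw [this]
        have hh : (saved ++ [seg]).headD seg = saved.headD seg := by
          cases saved <;> simp
        rw [hh]
        simp [scanA]
      · by_cases h3 : t = "/"
        · subst h3
          have lhs_eq : yeScanStk ("/" :: rest) saved seg = yeScanStk rest saved (seg + 1) := by
            simp [yeScanStk]
          rw [lhs_eq, ih]
          by_cases hnil : saved = []
          · subst hnil
            simp [scanA]
          · have hlen : 1 ≤ saved.length := by
              cases saved with
              | nil => exact absurd rfl hnil
              | cons a l2 => simp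
            have hh : saved.headD (seg + 1) = saved.headD seg := by
              cases saved with
              | nil => exact absurd rfl hnil
              | cons a l2 => simp
            rw [hh]
            simp [scanA, hnil]
        · have lhs_eq : yeScanStk (t :: rest) saved seg = yeScanStk rest saved seg := by
            simp [yeScanStk, h1, h2, h3]
          rw [lhs_eq, ih]
          simp [scanA, h1, h2, h3]

-- ===== VERDICT (by name: the statement is the Claim_ definition above) =====
theorem yeBranch_py_spec : Claim_equal_yeBranch_py := by
  intro l start _ hpre
  unfold Pre_yeBranch_py at hpre
  unfold Spec_yeBranch_py yeBranch_py yeBranch_py_alt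
  have h0 : 0 ≤ start + 1 := by omega
  rw [PySem.List.slice_from l h0]
  rw [show start + 1 = (((start + 1).toNat : Nat) : Int) by omega]
  rw [bridgeA l l.length (start + 1).toNat (by omega) 0 0]
  rw [Int.toNat_natCast, stack_sim]
  rfl

@[simp] theorem yeBranch_py_raises : Claim_raises_yeBranch_py := by
  unfold Claim_raises_yeBranch_py
  refine ⟨?_, by decide, by unfold Raises_yeBranch_py pvRaiseWitness_yeBranch_py; norm_num, by decide⟩
  intro l s _ hr hp
  unfold Raises_yeBranch_py at hr
  unfold Pre_yeBranch_py at hp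
  have h0 : (0 : Int) ≤ (l.length : Int) := by positivity
  omega
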